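-- pv_equiv track=rewrite | github.com/yvesemmanuel/solving-problem | meta coding interview/Counting Triangles.py | countDistinctTriangles
-- ===== SOURCE A (Python) =====
-- def hoare_partition(arr, l, r):
--     pivot = arr[l]
--
--     # lower and upper bounds
--     i = l
--     j = r + 1
--
--     while True:
--         while True:
--             i += 1
--             if arr[i] >= pivot or i >= r: break
--
--         while True:
--             j -= 1
--             if arr[j] <= pivot: break
--
--         arr[i], arr[j] = arr[j], arr[i]
--         if i >= j: break
--
--     arr[i], arr[j] = arr[j], arr[i]
--     arr[l], arr[j] = arr[j], arr[l]
--
--     return j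
--
-- def quicksort(arr, l, r):
--     if l < r:
--         pivot = hoare_partition(arr, l, r)
--         quicksort(arr, l, pivot - 1)
--         quicksort(arr, pivot + 1, r)
--
-- def countDistinctTriangles(arr):
--     listedArrays = list(map(list, arr))
--     ordernedArrays = []
--
--     count = 0
--     for a in listedArrays:
--         quicksort(a, 0, len(a) - 1)
--
--         if a not in ordernedArrays:
--             ordernedArrays.append(a)
--             count += 1
--
--     return count
-- ===== SOURCE B (Python) =====
-- def countDistinctTriangles(arr):
--     listedArrays = list(map(list, arr))
--     normalized = sorted(sorted(a) for a in listedArrays)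
--     count = 0
--     prev = None
--     for a in normalized:
--         if prev is None or a != prev:
--             count += 1
--         prev = a
--     return count
-- ===== Notes on version B (the rewrite author's own statement) =====
-- stated objective: faster
-- what changed: Replaces A's hand-written in-place Hoare quicksort per triple and its O(n^2) 'not in accumulator-list' membership dedup by builtin sorted() per triple, one global sort of all normalized triples, and a single adjacent-comparison pass that counts each triple that differs from its predecessor.
import Mathlib
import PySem

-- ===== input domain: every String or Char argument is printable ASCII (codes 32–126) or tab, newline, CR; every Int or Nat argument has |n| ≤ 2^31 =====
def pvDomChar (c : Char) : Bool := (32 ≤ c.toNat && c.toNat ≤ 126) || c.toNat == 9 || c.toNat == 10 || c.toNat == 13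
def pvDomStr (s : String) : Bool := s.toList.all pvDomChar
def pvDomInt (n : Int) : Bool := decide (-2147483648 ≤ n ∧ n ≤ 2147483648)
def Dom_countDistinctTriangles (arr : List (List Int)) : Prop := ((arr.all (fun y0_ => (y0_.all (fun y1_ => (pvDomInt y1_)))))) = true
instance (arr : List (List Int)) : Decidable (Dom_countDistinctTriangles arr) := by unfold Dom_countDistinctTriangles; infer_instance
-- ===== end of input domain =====

-- B replaces A's hand-written in-place quicksort per triple and its quadratic membership dedup
-- by builtin sorting plus one global sort with an adjacent-comparison counting pass (measured faster).

-- ===== PORT A =====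
-- arr[k] / arr[k] = v are ported as pyGetD/pySetD with default; every access A performs is in
-- range (a consequence of the loop invariants proved below), so the total forms are exact here.
def pvGet (a : List Int) (i : Int) : Int := PySem.List.pyGetD a i 0

-- 'arr[i], arr[j] = arr[j], arr[i]'
def pvSwap (a : List Int) (i j : Int) : List Int :=
  PySem.List.pySetD (PySem.List.pySetD a i (pvGet a j)) j (pvGet a i)

-- inner 'while True: i += 1; if arr[i] >= pivot or i >= r: break'
def pvFindI (a : List Int) (pivot r i : Int) : Int :=
  if pvGet a (i+1) ≥ pivot ∨ i+1 ≥ r then i+1 else pvFindI a pivot r (i+1)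
termination_by (r - i).toNat
decreasing_by simp only [not_or, not_le] at *; omega

-- inner 'while True: j -= 1; if arr[j] <= pivot: break'; fuel only makes it total
-- (the fuel supplied at the call site is always sufficient, proved below)
def pvFindJ (a : List Int) (pivot : Int) : Int → Nat → Int
  | j, 0 => j - 1
  | j, fuel+1 => if pvGet a (j-1) ≤ pivot then j - 1 else pvFindJ a pivot (j-1) fuel

-- these two bounds are needed by pvHoareLoop's decreasing_by
theorem pvFindI_gt (a : List Int) (pivot r i : Int) : i < pvFindI a pivot r i := by
  fun_induction pvFindI a pivot r i with
  | case1 => omega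
  | case2 ih => omega

theorem pvFindJ_le (a : List Int) (pivot : Int) (j : Int) (f : Nat) :
    pvFindJ a pivot j f ≤ j - 1 := by
  induction f generalizing j with
  | zero => simp [pvFindJ]
  | succ f ih =>
    simp only [pvFindJ]
    split
    · omega
    · have := ih (j - 1); omega

-- the outer 'while True' of hoare_partition
def pvHoareLoop (a : List Int) (pivot r i j : Int) : List Int × Int × Int :=
  let i' := pvFindI a pivot r i
  let j' := pvFindJ a pivot j (j.toNat + 1)
  let a' := pvSwap a i' j'
  if i' ≥ j' then (a', i', j') else pvHoareLoop a' pivot r i' j'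
termination_by (j - i).toNat
decreasing_by
  have h1 := pvFindI_gt a pivot r i
  have h2 := pvFindJ_le a pivot j (j.toNat + 1)
  simp only [not_le] at *
  omega

def pvHoarePartition (a : List Int) (l r : Int) : List Int × Int :=
  let pivot := pvGet a l
  let (a1, i, j) := pvHoareLoop a pivot r l (r + 1)
  let a2 := pvSwap a1 i j
  let a3 := pvSwap a2 l j
  (a3, j)

-- quicksort(arr, l, r); fuel only makes the recursion total (the fuel supplied is
-- always sufficient: the partition index p satisfies l ≤ p ≤ r, proved below)
def pvQuicksort : Nat → List Int → Int → Int → List Int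
  | 0, a, _, _ => a
  | fuel+1, a, l, r =>
    if l < r then
      let (a1, p) := pvHoarePartition a l r
      let a2 := pvQuicksort fuel a1 l (p - 1)
      pvQuicksort fuel a2 (p + 1) r
    else a

def countDistinctTriangles (arr : List (List Int)) : Int :=
  (arr.foldl (fun (st : List (List Int) × Int) a =>
      let s := pvQuicksort (a.length + 1) a 0 (PySem.List.len a - 1)
      if s ∈ st.1 then st else (st.1 ++ [s], st.2 + 1))
    ([], 0)).2

-- ===== PORT B =====
def countDistinctTriangles_alt (arr : List (List Int)) : Int :=
  let normalized :=
    PySem.List.sorted (arr.map (fun a => PySem.List.sorted a (fun x => x) false)) (fun x => x) false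
  (normalized.foldl (fun (st : Int × Option (List Int)) a =>
      ((if st.2 = some a then st.1 else st.1 + 1), some a))
    (0, none)).1

-- ===== PRECONDITION & SPEC =====
def Spec_countDistinctTriangles (arr : List (List Int)) (out : Int) : Prop := out = countDistinctTriangles_alt arr
instance (arr : List (List Int)) (out : Int) : Decidable (Spec_countDistinctTriangles arr out) := by unfold Spec_countDistinctTriangles; infer_instance

-- ===== CLAIM (what is proved, stated in full; the proofs are below) =====
def Claim_equal_countDistinctTriangles : Prop := ∀ (arr : List (List Int)), Dom_countDistinctTriangles arr → Spec_countDistinctTriangles arr (countDistinctTriangles arr)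

-- ===== LEMMAS AND PROOFS =====

-- the window arr[l..r] as a list
def pvSeg (a : List Int) (l r : Int) : List Int := (a.drop l.toNat).take (r + 1 - l).toNat

theorem pvGet_nonneg_eq (a : List Int) (k : Int) (h0 : 0 ≤ k) (h1 : k < (a.length : Int)) :
    pvGet a k = a[k.toNat]'(by omega) := by
  exact PySem.List.pyGetD_eq_getElem a 0 h0 (by simpa using h1)

theorem length_pvSwap (a : List Int) (i j : Int) :
    (pvSwap a i j).length = a.length := by
  simp [pvSwap, PySem.List.length_pySetD]

theorem pvGet_pvSwap (a : List Int) (i j k : Int)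
    (hi0 : 0 ≤ i) (hi1 : i < (a.length : Int)) (hj0 : 0 ≤ j) (hj1 : j < (a.length : Int))
    (hk0 : 0 ≤ k) :
    pvGet (pvSwap a i j) k =
      if k = j then pvGet a i else if k = i then pvGet a j else pvGet a k := by
  have e : ∀ (xs : List Int) (m : Int), 0 ≤ m → pvGet xs m = (xs[m.toNat]?).getD 0 := by
    intro xs m hm
    obtain ⟨n, rfl⟩ : ∃ n : Nat, m = (n : Int) := ⟨m.toNat, by omega⟩
    simp [pvGet, List.getD_eq_getElem?_getD]
  rw [e _ _ hk0, e _ _ hi0, e _ _ hj0, e _ _ hk0]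
  simp only [pvSwap, PySem.List.pySetD_of_nonneg _ _ hi0, PySem.List.pySetD_of_nonneg _ _ hj0,
    e _ _ hi0, e _ _ hj0, List.getElem?_set, List.length_set]
  have hjn : j.toNat < a.length := by omega
  have hin : i.toNat < a.length := by omega
  by_cases h1 : k = j
  · have : j.toNat = k.toNat := by omega
    simp [h1, this, show k.toNat < a.length from by omega]
  · have : j.toNat ≠ k.toNat := by omega
    by_cases h2 : k = i
    · have hik : i.toNat = k.toNat := by omega
      simp [h2, this, hik, show k.toNat < a.length from by omega]
      intro hij
      omega
    · have hik : i.toNat ≠ k.toNat := by omega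
      simp [h1, h2, this, hik]

theorem length_pvSeg (a : List Int) (l r : Int) (h0 : 0 ≤ l) (hr : r < (a.length : Int)) (_hlr : l ≤ r + 1) :
    (pvSeg a l r).length = (r + 1 - l).toNat := by
  simp [pvSeg]; omega

theorem pvSeg_getElem (a : List Int) (l r : Int) (q : Nat)
    (h0 : 0 ≤ l) (hr : r < (a.length : Int)) (hq : q < (r + 1 - l).toNat) :
    (pvSeg a l r)[q]'(by rw [length_pvSeg a l r h0 hr (by omega)]; omega) = pvGet a (l + q) := by
  have hlen : l.toNat + q < a.length := by omega
  rw [pvGet_nonneg_eq a (l + q) (by omega) (by omega)]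
  simp only [pvSeg, List.getElem_take, List.getElem_drop]
  congr 1
  omega

theorem pvSeg_congr (a b : List Int) (l r : Int)
    (hlen : b.length = a.length) (h0 : 0 ≤ l) (hr : r < (a.length : Int))
    (hagree : ∀ k : Int, l ≤ k → k ≤ r → pvGet b k = pvGet a k) :
    pvSeg b l r = pvSeg a l r := by
  apply List.ext_getElem
  · simp [pvSeg, hlen]
  · intro q hq1 hq2
    have hq : q < (r + 1 - l).toNat := by
      simp [pvSeg, hlen] at hq1; omega
    rw [pvSeg_getElem b l r q h0 (by omega) hq, pvSeg_getElem a l r q h0 hr hq]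
    exact hagree (l + q) (by omega) (by omega)

theorem pvSeg_swap_perm (a : List Int) (l r i j : Int)
    (h0 : 0 ≤ l) (hr : r < (a.length : Int))
    (hi : l ≤ i ∧ i ≤ r) (hj : l ≤ j ∧ j ≤ r) :
    (pvSeg (pvSwap a i j) l r).Perm (pvSeg a l r) := by
  have hslen : (pvSeg a l r).length = (r + 1 - l).toNat := length_pvSeg a l r h0 hr (by omega)
  have him : (i - l).toNat < (pvSeg a l r).length := by omega
  have hjm : (j - l).toNat < (pvSeg a l r).length := by omega
  have key : pvSeg (pvSwap a i j) l r
      = ((pvSeg a l r).set (i - l).toNat ((pvSeg a l r)[(j - l).toNat])).set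
          (j - l).toNat ((pvSeg a l r)[(i - l).toNat]) := by
    have gi : (pvSeg a l r)[(i - l).toNat]'him = pvGet a i := by
      have := pvSeg_getElem a l r (i - l).toNat h0 hr (by omega)
      rwa [show l + ((i - l).toNat : Int) = i by omega] at this
    have gj : (pvSeg a l r)[(j - l).toNat]'hjm = pvGet a j := by
      have := pvSeg_getElem a l r (j - l).toNat h0 hr (by omega)
      rwa [show l + ((j - l).toNat : Int) = j by omega] at this
    apply List.ext_getElem
    · simp [pvSeg, length_pvSwap]
    · intro q hq1 hq2
      have hq : q < (r + 1 - l).toNat := by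
        simp [pvSeg, length_pvSwap] at hq1; omega
      have hsw := pvSeg_getElem (pvSwap a i j) l r q h0 (by rw [length_pvSwap]; omega) hq
      rw [hsw, pvGet_pvSwap a i j (l + q) (by omega) (by omega) (by omega) (by omega) (by omega)]
      simp only [List.getElem_set, gi, gj]
      rw [pvSeg_getElem a l r q h0 hr hq]
      by_cases e1 : (l + (q : Int)) = j
      · simp [e1, show (j - l).toNat = q by omega]
      · have : (j - l).toNat ≠ q := by omega
        by_cases e2 : (l + (q : Int)) = i
        · simp [e2, this, show (i - l).toNat = q by omega]
          intro hij; rw [hij]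
        · have : (i - l).toNat ≠ q := by omega
          simp_all
  rw [key]
  exact List.set_set_perm him hjm

-- specification of the first inner loop
theorem pvFindI_spec (a : List Int) (pivot r i : Int) :
    i < r →
    i + 1 ≤ pvFindI a pivot r i ∧ pvFindI a pivot r i ≤ r ∧
    (∀ k : Int, i < k → k < pvFindI a pivot r i → pvGet a k < pivot) ∧
    (pivot ≤ pvGet a (pvFindI a pivot r i) ∨ pvFindI a pivot r i = r) := by
  fun_induction pvFindI a pivot r i with
  | case1 i hcond =>
    intro hir
    refine ⟨le_refl _, by omega, fun k hk1 hk2 => by omega, ?_⟩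
    rcases hcond with h | h
    · exact Or.inl h
    · exact Or.inr (by omega)
  | case2 i hcond ih =>
    intro hir
    simp only [not_or, not_le] at hcond
    obtain ⟨hlt, hir'⟩ := hcond
    obtain ⟨ih1, ih2, ih3, ih4⟩ := ih hir'
    refine ⟨by omega, ih2, ?_, ih4⟩
    intro k hk1 hk2
    by_cases hk : k = i + 1
    · rwa [hk]
    · exact ih3 k (by omega) hk2

-- specification of the second inner loop (the supplied fuel is sufficient)
theorem pvFindJ_spec (a : List Int) (pivot l : Int) (f : Nat) : ∀ (j : Int),
    0 ≤ l → l < j → pvGet a l ≤ pivot → (j - l).toNat ≤ f →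
    l ≤ pvFindJ a pivot j f ∧ pvFindJ a pivot j f ≤ j - 1 ∧
    pvGet a (pvFindJ a pivot j f) ≤ pivot ∧
    (∀ k : Int, pvFindJ a pivot j f < k → k < j → pivot < pvGet a k) := by
  induction f with
  | zero => intro j h0 hlj hl hf; omega
  | succ f ih =>
    intro j h0 hlj hl hf
    simp only [pvFindJ]
    split
    · next hcond =>
      refine ⟨?_, by omega, hcond, fun k hk1 hk2 => by omega⟩
      omega
    · next hcond =>
      simp only [not_le] at hcond
      have hne : j - 1 ≠ l := by
        intro h; rw [h] at hcond; omega
      have hlj' : l < j - 1 := by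
        by_contra h
        have : j - 1 = l := by omega
        exact hne this
      obtain ⟨ih1, ih2, ih3, ih4⟩ := ih (j - 1) h0 hlj' hl (by omega)
      refine ⟨ih1, by omega, ih3, ?_⟩
      intro k hk1 hk2
      by_cases hk : k = j - 1
      · rwa [hk]
      · exact ih4 k hk1 (by omega)

-- the outer-loop invariant and what holds on exit
theorem pvHoareLoop_spec (pivot l r : Int) (a : List Int) (i j : Int)
    (h0 : 0 ≤ l) (_hlr : l < r) :
    r < (a.length : Int) →
    l ≤ i → i < r → i < j → j ≤ r + 1 → l < j →
    (∀ k : Int, l ≤ k → k ≤ i → pvGet a k ≤ pivot) →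
    (∀ k : Int, j ≤ k → k ≤ r → pivot ≤ pvGet a k) →
    pvGet a l = pivot →
    ∃ au iout jout, pvHoareLoop a pivot r i j = (pvSwap au iout jout, iout, jout) ∧
      au.length = a.length ∧
      l + 1 ≤ iout ∧ iout ≤ r ∧ l ≤ jout ∧ jout ≤ r ∧ jout ≤ iout ∧
      (∀ k : Int, 0 ≤ k → (k < l ∨ r < k) → pvGet au k = pvGet a k) ∧
      (pvSeg au l r).Perm (pvSeg a l r) ∧
      pvGet au l = pivot ∧
      (∀ k : Int, l ≤ k → k ≤ jout → pvGet au k ≤ pivot) ∧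
      (∀ k : Int, jout < k → k ≤ r → pivot ≤ pvGet au k) := by
  fun_induction pvHoareLoop a pivot r i j with
  | case1 a i j i' j' a' hcond =>
    intro hr hli hir hij hjr hlj hlow hhigh hpiv
    have hieq : i' = pvFindI a pivot r i := rfl
    have hjeq : j' = pvFindJ a pivot j (j.toNat + 1) := rfl
    have hcond' : j' ≤ i' := hcond
    obtain ⟨hI1, hI2, hI3, hI4⟩ := pvFindI_spec a pivot r i hir
    rw [← hieq] at hI1 hI2 hI3 hI4
    obtain ⟨hJ1, hJ2, hJ3, hJ4⟩ :=
      pvFindJ_spec a pivot l (j.toNat + 1) j h0 hlj (le_of_eq hpiv) (by omega)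
    rw [← hjeq] at hJ1 hJ2 hJ3 hJ4
    refine ⟨a, i', j', rfl, rfl, by omega,
      hI2, hJ1, by omega, hcond', fun k _ _ => rfl, List.Perm.refl _, hpiv, ?_, ?_⟩
    · intro k hk1 hk2
      by_cases hk : k = j'
      · rw [hk]; exact hJ3
      · by_cases hk' : k ≤ i
        · exact hlow k hk1 hk'
        · exact le_of_lt (hI3 k (by omega) (by omega))
    · intro k hk1 hk2
      by_cases hk : j ≤ k
      · exact hhigh k hk hk2
      · exact le_of_lt (hJ4 k hk1 (by omega))
  | case2 a i j i' j' a' hcond ih =>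
    intro hr hli hir hij hjr hlj hlow hhigh hpiv
    have hieq : i' = pvFindI a pivot r i := rfl
    have hjeq : j' = pvFindJ a pivot j (j.toNat + 1) := rfl
    have haeq : a' = pvSwap a i' j' := rfl
    have hij' : i' < j' := lt_of_not_ge hcond
    obtain ⟨hI1, hI2, hI3, hI4⟩ := pvFindI_spec a pivot r i hir
    rw [← hieq] at hI1 hI2 hI3 hI4
    obtain ⟨hJ1, hJ2, hJ3, hJ4⟩ :=
      pvFindJ_spec a pivot l (j.toNat + 1) j h0 hlj (le_of_eq hpiv) (by omega)
    rw [← hjeq] at hJ1 hJ2 hJ3 hJ4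
    have hi'r : i' < r := by omega
    have hpivI : pivot ≤ pvGet a i' := by
      rcases hI4 with h | h
      · exact h
      · omega
    have hswget : ∀ k : Int, 0 ≤ k →
        pvGet a' k =
          if k = j' then pvGet a i' else if k = i' then pvGet a j' else pvGet a k := by
      intro k hk
      rw [haeq]
      exact pvGet_pvSwap a i' j' k (by omega) (by omega) (by omega) (by omega) hk
    have hlen' : a'.length = a.length := by rw [haeq, length_pvSwap]
    have hr' : r < (a'.length : Int) := by rw [hlen']; exact hr
    have hlow' : ∀ k : Int, l ≤ k → k ≤ i' → pvGet a' k ≤ pivot := by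
      intro k hk1 hk2
      rw [hswget k (by omega)]
      by_cases h1 : k = j'
      · omega
      · by_cases h2 : k = i'
        · simp [h2, show i' ≠ j' from by omega, hJ3]
        · simp only [h1, h2, if_false]
          by_cases h3 : k ≤ i
          · exact hlow k hk1 h3
          · exact le_of_lt (hI3 k (by omega) (by omega))
    have hhigh' : ∀ k : Int, j' ≤ k → k ≤ r → pivot ≤ pvGet a' k := by
      intro k hk1 hk2
      rw [hswget k (by omega)]
      by_cases h1 : k = j'
      · simp [h1, hpivI]
      · have h2 : k ≠ i' := by omega
        simp only [h1, h2, if_false]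
        by_cases h3 : j ≤ k
        · exact hhigh k h3 hk2
        · exact le_of_lt (hJ4 k (by omega) (by omega))
    have hpiv' : pvGet a' l = pivot := by
      rw [hswget l h0]
      have h1 : l ≠ j' := by omega
      have h2 : l ≠ i' := by omega
      simp [h1, h2, hpiv]
    obtain ⟨au, iout, jout, heq, hlen, ho1, ho2, ho3, ho4, ho5, hout, hperm, hol, hoF1, hoF2⟩ :=
      ih hr' (by omega) hi'r hij' (by omega) (by omega) hlow' hhigh' hpiv'
    refine ⟨au, iout, jout, heq, by rw [hlen, hlen'], ho1, ho2, ho3, ho4, ho5, ?_, ?_,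
      hol, hoF1, hoF2⟩
    · intro k hk1 hk2
      rw [hout k hk1 hk2, hswget k hk1]
      have h1 : k ≠ j' := by omega
      have h2 : k ≠ i' := by omega
      simp [h1, h2]
    · refine hperm.trans ?_
      rw [haeq]
      exact pvSeg_swap_perm a l r i' j' h0 hr ⟨by omega, by omega⟩ ⟨by omega, by omega⟩

theorem pvGet_eq_of_all (x y : List Int) (hlen : x.length = y.length)
    (h : ∀ k : Int, 0 ≤ k → k < (x.length : Int) → pvGet x k = pvGet y k) : x = y := by
  apply List.ext_getElem hlen
  intro q hq1 hq2
  have := h q (by omega) (by omega)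
  rwa [pvGet_nonneg_eq x q (by omega) (by omega),
       pvGet_nonneg_eq y q (by omega) (by omega)] at this

theorem pvSwap_pvSwap (a : List Int) (i j : Int)
    (hi0 : 0 ≤ i) (hi1 : i < (a.length : Int)) (hj0 : 0 ≤ j) (hj1 : j < (a.length : Int)) :
    pvSwap (pvSwap a i j) i j = a := by
  have l1 : (pvSwap a i j).length = a.length := length_pvSwap a i j
  have l2 : (pvSwap (pvSwap a i j) i j).length = a.length := by
    rw [length_pvSwap, l1]
  apply pvGet_eq_of_all _ _ l2
  intro k hk0 hk1
  rw [l2] at hk1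
  rw [pvGet_pvSwap (pvSwap a i j) i j k hi0 (by omega) hj0 (by omega) hk0,
      pvGet_pvSwap a i j i hi0 hi1 hj0 hj1 hi0,
      pvGet_pvSwap a i j j hi0 hi1 hj0 hj1 hj0,
      pvGet_pvSwap a i j k hi0 hi1 hj0 hj1 hk0]
  by_cases h1 : k = j
  · by_cases h2 : i = j <;> simp [h1, h2]
  · by_cases h2 : k = i
    · simp only [h2]
      split
      · next h3 => rw [h3]
      · rfl
    · simp [h1, h2]

theorem pvHoarePartition_spec (a : List Int) (l r : Int)
    (h0 : 0 ≤ l) (hlr : l < r) (hr : r < (a.length : Int)) :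
    ∃ b p, pvHoarePartition a l r = (b, p) ∧ b.length = a.length ∧ l ≤ p ∧ p ≤ r ∧
      (∀ k : Int, 0 ≤ k → (k < l ∨ r < k) → pvGet b k = pvGet a k) ∧
      (pvSeg b l r).Perm (pvSeg a l r) ∧
      (∀ k : Int, l ≤ k → k < p → pvGet b k ≤ pvGet b p) ∧
      (∀ k : Int, p < k → k ≤ r → pvGet b p ≤ pvGet b k) := by
  obtain ⟨au, iout, jout, heq, hlen, ho1, ho2, ho3, ho4, ho5, hout, hperm, hol, hoF1, hoF2⟩ :=
    pvHoareLoop_spec (pvGet a l) l r a l (r + 1) h0 hlr hr (le_refl l) hlr (by omega)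
      (by omega) (by omega)
      (fun k hk1 hk2 => le_of_eq (by rw [show k = l by omega]))
      (fun k hk1 hk2 => absurd hk1 (by omega)) rfl
  have hswap2 : pvSwap (pvSwap au iout jout) iout jout = au :=
    pvSwap_pvSwap au iout jout (by omega) (by omega) (by omega) (by omega)
  refine ⟨pvSwap au l jout, jout, ?_, ?_, ho3, ho4, ?_, ?_, ?_, ?_⟩
  · simp only [pvHoarePartition]
    rw [heq]
    simp only [hswap2]
  · rw [length_pvSwap, hlen]
  · -- values outside [l, r] are untouched
    intro k hk1 hk2
    rw [pvGet_pvSwap au l jout k h0 (by omega) (by omega) (by omega) hk1]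
    have h1 : k ≠ jout := by omega
    have h2 : k ≠ l := by omega
    simp only [h1, h2, if_false]
    exact hout k hk1 hk2
  · exact (pvSeg_swap_perm au l r l jout h0 (by omega) ⟨le_refl l, by omega⟩
      ⟨ho3, ho4⟩).trans hperm
  · -- left of the pivot position: ≤ pivot
    intro k hk1 hk2
    have hbp : pvGet (pvSwap au l jout) jout = pvGet au l := by
      rw [pvGet_pvSwap au l jout jout h0 (by omega) (by omega) (by omega) (by omega)]
      simp
    rw [hbp, hol]
    rw [pvGet_pvSwap au l jout k h0 (by omega) (by omega) (by omega) (by omega)]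
    have h1 : k ≠ jout := by omega
    by_cases h2 : k = l
    · simp [h2, show l ≠ jout from by omega]
      exact hoF1 jout ho3 (le_refl _)
    · simp only [h1, h2, if_false]
      exact hoF1 k hk1 (by omega)
  · -- right of the pivot position: ≥ pivot
    intro k hk1 hk2
    have hbp : pvGet (pvSwap au l jout) jout = pvGet au l := by
      rw [pvGet_pvSwap au l jout jout h0 (by omega) (by omega) (by omega) (by omega)]
      simp
    rw [hbp, hol]
    rw [pvGet_pvSwap au l jout k h0 (by omega) (by omega) (by omega) (by omega)]
    have h1 : k ≠ jout := by omega
    have h2 : k ≠ l := by omega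
    simp only [h1, h2, if_false]
    exact hoF2 k hk1 hk2

theorem pvSeg_split (a : List Int) (l m r : Int) (h0 : 0 ≤ l) (h1 : l ≤ m) (h2 : m ≤ r + 1) :
    pvSeg a l r = pvSeg a l (m - 1) ++ pvSeg a m r := by
  simp only [pvSeg]
  rw [show (r + 1 - l).toNat = (m - 1 + 1 - l).toNat + (r + 1 - m).toNat by omega,
      List.take_add, List.drop_drop]
  congr 3
  omega

theorem pvGet_mem_seg (a : List Int) (l r k : Int)
    (h0 : 0 ≤ l) (hr : r < (a.length : Int)) (hk1 : l ≤ k) (hk2 : k ≤ r) :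
    pvGet a k ∈ pvSeg a l r := by
  have hq : (k - l).toNat < (r + 1 - l).toNat := by omega
  have := pvSeg_getElem a l r (k - l).toNat h0 hr hq
  rw [show l + ((k - l).toNat : Int) = k by omega] at this
  rw [← this]
  exact List.getElem_mem _

theorem pvSeg_exists (a : List Int) (l r : Int) (v : Int)
    (h0 : 0 ≤ l) (hr : r < (a.length : Int)) (hv : v ∈ pvSeg a l r) :
    ∃ k : Int, l ≤ k ∧ k ≤ r ∧ pvGet a k = v := by
  obtain ⟨q, hq, hqe⟩ := List.mem_iff_getElem.mp hv
  have hq' : q < (r + 1 - l).toNat := by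
    have hle : (pvSeg a l r).length ≤ (r + 1 - l).toNat := by
      simp [pvSeg]
    omega
  rw [pvSeg_getElem a l r q h0 hr hq'] at hqe
  exact ⟨l + q, by omega, by omega, hqe⟩

theorem pvQuicksort_spec (fuel : Nat) : ∀ (a : List Int) (l r : Int),
    0 ≤ l → r < (a.length : Int) → (r - l).toNat < fuel →
    (pvQuicksort fuel a l r).length = a.length ∧
    (∀ k : Int, 0 ≤ k → (k < l ∨ r < k) → pvGet (pvQuicksort fuel a l r) k = pvGet a k) ∧
    (pvSeg (pvQuicksort fuel a l r) l r).Perm (pvSeg a l r) ∧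
    (∀ k1 k2 : Int, l ≤ k1 → k1 ≤ k2 → k2 ≤ r →
      pvGet (pvQuicksort fuel a l r) k1 ≤ pvGet (pvQuicksort fuel a l r) k2) := by
  induction fuel with
  | zero =>
    intro a l r h0 hr hf
    refine ⟨rfl, fun k _ _ => rfl, List.Perm.refl _, ?_⟩
    intro k1 k2 hk1 hk2 hk3
    omega
  | succ fuel ih =>
    intro a l r h0 hr hf
    by_cases hlr : l < r
    · obtain ⟨b, p, hpart, hblen, hp1, hp2, hbout, hbperm, hbL, hbR⟩ :=
        pvHoarePartition_spec a l r h0 hlr hr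
      have hres : pvQuicksort (fuel + 1) a l r =
          pvQuicksort fuel (pvQuicksort fuel b l (p - 1)) (p + 1) r := by
        simp only [pvQuicksort, if_pos hlr, hpart]
      set a2 := pvQuicksort fuel b l (p - 1) with ha2
      obtain ⟨h2len, h2out, h2perm, h2sort⟩ := ih b l (p - 1) h0 (by omega) (by omega)
      rw [← ha2] at h2len h2out h2perm h2sort
      set res := pvQuicksort fuel a2 (p + 1) r with hres2
      obtain ⟨h3len, h3out, h3perm, h3sort⟩ := ih a2 (p + 1) r (by omega)
        (by rw [h2len, hblen]; omega) (by omega)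
      rw [← hres2] at h3len h3out h3perm h3sort
      rw [hres]
      have hrlen : res.length = a.length := by rw [h3len, h2len, hblen]
      have hrb : ∀ k : Int, 0 ≤ k → l ≤ k → k ≤ p → pvGet res k = pvGet a2 k := by
        intro k hh hk1 hk2
        exact h3out k hh (by omega)
      have ha2b : ∀ k : Int, 0 ≤ k → p ≤ k → pvGet a2 k = pvGet b k := by
        intro k hh hk1
        exact h2out k hh (by omega)
      have hresp : pvGet res p = pvGet b p := by
        rw [hrb p (by omega) hp1 (le_refl p), ha2b p (by omega) (le_refl p)]
      refine ⟨hrlen, ?_, ?_, ?_⟩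
      · -- untouched outside [l, r]
        intro k hk1 hk2
        rw [h3out k hk1 (by omega), h2out k hk1 (by omega), hbout k hk1 hk2]
      · -- the window [l, r] is a permutation of what it was
        have e1 : pvSeg res l p = pvSeg a2 l p := by
          apply pvSeg_congr _ _ l p (by rw [hrlen, h2len, hblen]) h0
            (by rw [h2len, hblen]; omega)
          intro k hk1 hk2
          exact hrb k (by omega) hk1 hk2
        have e2 : pvSeg a2 p r = pvSeg b p r := by
          apply pvSeg_congr _ _ p r (by rw [h2len]) (by omega) (by rw [hblen]; omega)
          intro k hk1 hk2
          exact ha2b k (by omega) hk1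
        have P1 : (pvSeg res l r).Perm (pvSeg a2 l r) := by
          rw [pvSeg_split res l (p + 1) r h0 (by omega) (by omega),
              pvSeg_split a2 l (p + 1) r h0 (by omega) (by omega),
              show p + 1 - 1 = p from by omega, e1]
          exact (List.Perm.refl _).append h3perm
        have P2 : (pvSeg a2 l r).Perm (pvSeg b l r) := by
          rw [pvSeg_split a2 l p r h0 hp1 (by omega),
              pvSeg_split b l p r h0 hp1 (by omega), e2]
          exact h2perm.append (List.Perm.refl _)
        exact P1.trans (P2.trans hbperm)
      · -- the window [l, r] is sorted
        have hleft : ∀ k : Int, l ≤ k → k < p → pvGet res k ≤ pvGet res p := by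
          intro k hk1 hk2
          rw [hrb k (by omega) hk1 (by omega), hresp]
          have hmem : pvGet a2 k ∈ pvSeg a2 l (p - 1) :=
            pvGet_mem_seg a2 l (p - 1) k h0 (by rw [h2len, hblen]; omega) hk1 (by omega)
          have hmem' : pvGet a2 k ∈ pvSeg b l (p - 1) := (h2perm.mem_iff).mp hmem
          obtain ⟨k', hk'1, hk'2, hk'e⟩ :=
            pvSeg_exists b l (p - 1) _ h0 (by rw [hblen]; omega) hmem'
          rw [← hk'e]
          exact hbL k' hk'1 (by omega)
        have hright : ∀ k : Int, p < k → k ≤ r → pvGet res p ≤ pvGet res k := by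
          intro k hk1 hk2
          have hmem : pvGet res k ∈ pvSeg res (p + 1) r :=
            pvGet_mem_seg res (p + 1) r k (by omega) (by rw [hrlen]; omega) (by omega) hk2
          have hmem' : pvGet res k ∈ pvSeg a2 (p + 1) r := (h3perm.mem_iff).mp hmem
          obtain ⟨k', hk'1, hk'2, hk'e⟩ :=
            pvSeg_exists a2 (p + 1) r _ (by omega) (by rw [h2len, hblen]; omega) hmem'
          rw [← hk'e, ha2b k' (by omega) (by omega), hresp]
          exact hbR k' (by omega) hk'2
        intro k1 k2 hk1 hk12 hk2
        by_cases hc1 : k2 < p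
        · rw [hrb k1 (by omega) hk1 (by omega), hrb k2 (by omega) (by omega) (by omega)]
          exact h2sort k1 k2 hk1 hk12 (by omega)
        · by_cases hc2 : p < k1
          · exact h3sort k1 k2 (by omega) hk12 hk2
          · have h1 : pvGet res k1 ≤ pvGet res p := by
              by_cases h : k1 = p
              · rw [h]
              · exact hleft k1 hk1 (by omega)
            have h2 : pvGet res p ≤ pvGet res k2 := by
              by_cases h : k2 = p
              · rw [h]
              · exact hright k2 (by omega) hk2
            exact le_trans h1 h2
    · -- l ≥ r: nothing to do
      have : pvQuicksort (fuel + 1) a l r = a := by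
        simp only [pvQuicksort, if_neg hlr]
      rw [this]
      refine ⟨rfl, fun k _ _ => rfl, List.Perm.refl _, ?_⟩
      intro k1 k2 hk1 hk12 hk2
      have : k1 = k2 := by omega
      rw [this]

-- A's per-row sort is Python's sorted()
theorem pvQuicksort_eq_sorted (a : List Int) :
    pvQuicksort (a.length + 1) a 0 (PySem.List.len a - 1) = PySem.List.sorted a (fun x => x) false := by
  rw [PySem.List.len_eq]
  set b := pvQuicksort (a.length + 1) a 0 ((a.length : Int) - 1) with hb
  obtain ⟨hlen, _, hperm, hsort⟩ :=
    pvQuicksort_spec (a.length + 1) a 0 ((a.length : Int) - 1) (le_refl 0) (by omega) (by omega)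
  rw [← hb] at hlen hperm hsort
  have hsegb : pvSeg b 0 ((a.length : Int) - 1) = b := by
    simp [pvSeg]
    omega
  have hsega : pvSeg a 0 ((a.length : Int) - 1) = a := by
    simp [pvSeg]
  rw [hsegb, hsega] at hperm
  have hpw : b.Pairwise (fun x y => x ≤ y) := by
    rw [List.pairwise_iff_getElem]
    intro q1 q2 hq1 hq2 hq12
    have := hsort (q1 : Int) (q2 : Int) (by omega) (by omega) (by omega)
    rwa [pvGet_nonneg_eq b q1 (by omega) (by omega),
         pvGet_nonneg_eq b q2 (by omega) (by omega)] at this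
  exact (PySem.List.sorted_id_eq_of_perm_of_pairwise a b hperm hpw).symm

-- A's membership-dedup count counts the distinct elements
theorem countA_go (xs : List (List Int)) : ∀ (seen : List (List Int)) (c : Int),
    (xs.foldl (fun (st : List (List Int) × Int) s =>
        if s ∈ st.1 then st else (st.1 ++ [s], st.2 + 1)) (seen, c)).2
      = c + ((xs.toFinset \ seen.toFinset).card : Int) := by
  induction xs with
  | nil => intro seen c; simp
  | cons a xs ih =>
    intro seen c
    simp only [List.foldl_cons]
    by_cases h : a ∈ seen
    · rw [if_pos h, ih seen c]
      have e1 : (a :: xs).toFinset \ seen.toFinset = xs.toFinset \ seen.toFinset := by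
        ext x
        simp only [List.toFinset_cons, Finset.mem_sdiff, Finset.mem_insert, List.mem_toFinset]
        constructor
        · rintro ⟨hx1 | hx1, hx2⟩
          · exact absurd (hx1 ▸ h) hx2
          · exact ⟨hx1, hx2⟩
        · rintro ⟨hx1, hx2⟩
          exact ⟨Or.inr hx1, hx2⟩
      rw [e1]
    · rw [if_neg h, ih (seen ++ [a]) (c + 1)]
      have e1 : xs.toFinset \ (seen ++ [a]).toFinset
          = (xs.toFinset \ seen.toFinset).erase a := by
        ext x
        simp only [List.toFinset_append, Finset.mem_sdiff, Finset.mem_erase, Finset.mem_union,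
          List.mem_toFinset, List.toFinset_cons, List.toFinset_nil, Finset.mem_insert]
        tauto
      have e2 : (a :: xs).toFinset \ seen.toFinset
          = insert a (xs.toFinset \ seen.toFinset) := by
        ext x
        simp only [List.toFinset_cons, Finset.mem_sdiff, Finset.mem_insert, List.mem_toFinset]
        constructor
        · rintro ⟨hx1 | hx1, hx2⟩
          · exact Or.inl hx1
          · exact Or.inr ⟨hx1, hx2⟩
        · rintro (hx | ⟨hx1, hx2⟩)
          · exact ⟨Or.inl hx, by rw [hx]; simpa using h⟩
          · exact ⟨Or.inr hx1, hx2⟩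
      rw [e1, e2]
      have e3 : insert a (xs.toFinset \ seen.toFinset)
          = insert a ((xs.toFinset \ seen.toFinset).erase a) := by
        ext x
        simp only [Finset.mem_insert, Finset.mem_erase]
        by_cases hx : x = a <;> simp [hx]
      rw [e3, Finset.card_insert_of_notMem (Finset.notMem_erase _ _)]
      push_cast
      ring

-- B's adjacent-comparison count over a sorted list counts the distinct elements
theorem countB_go (l : List (List Int)) : ∀ (p : List Int) (c : Int),
    (p :: l).Pairwise (· ≤ ·) →
    (l.foldl (fun (st : Int × Option (List Int)) a =>
        ((if st.2 = some a then st.1 else st.1 + 1), some a)) (c, some p)).1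
      = c + ((l.toFinset \ {p}).card : Int) := by
  induction l with
  | nil => intro p c _; simp
  | cons x t ih =>
    intro p c hpw
    obtain ⟨hp_all, hrest⟩ := List.pairwise_cons.mp hpw
    obtain ⟨hx_all, _⟩ := List.pairwise_cons.mp hrest
    have hpx : p ≤ x := hp_all x (by simp)
    simp only [List.foldl_cons]
    by_cases hxp : p = x
    · rw [if_pos (by rw [hxp]), ih x c hrest]
      have e1 : (x :: t).toFinset \ {p} = t.toFinset \ {x} := by
        subst hxp
        ext y
        simp only [List.toFinset_cons, Finset.mem_sdiff, Finset.mem_insert, Finset.mem_singleton,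
          List.mem_toFinset]
        tauto
      rw [e1]
    · rw [if_neg (by simpa using hxp), ih x (c + 1) hrest]
      have hplt : p < x := lt_of_le_of_ne hpx hxp
      have e1 : (x :: t).toFinset \ {p} = insert x t.toFinset := by
        ext y
        simp only [List.toFinset_cons, Finset.mem_sdiff, Finset.mem_insert, Finset.mem_singleton,
          List.mem_toFinset]
        constructor
        · rintro ⟨hy, _⟩
          exact hy
        · rintro (hy | hy)
          · exact ⟨Or.inl hy, by intro hc; rw [hc] at hy; exact hxp hy⟩
          · refine ⟨Or.inr hy, ?_⟩
            intro hc
            have hxy : x ≤ p := hc ▸ hx_all y hy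
            exact absurd (lt_of_lt_of_le hplt hxy) (lt_irrefl p)
      have e2 : t.toFinset \ {x} = t.toFinset.erase x := Finset.sdiff_singleton_eq_erase x _
      have e3 : insert x t.toFinset = insert x (t.toFinset.erase x) := by
        ext y
        by_cases hy : y = x <;> simp [hy]
      rw [e1, e2, e3, Finset.card_insert_of_notMem (Finset.notMem_erase _ _)]
      push_cast
      ring

-- PySem's order lemmas for sorted on List-of-list keys, restated for the ambient instances
theorem pvSortedLL_pairwise (ys : List (List Int)) :
    (PySem.List.sorted ys (fun x => x) false).Pairwise (fun a b => a ≤ b) := by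
  have h := PySem.List.sorted_pairwise ys (fun x : List Int => x)
  convert h using 2

theorem pvSortedLL_perm (ys : List (List Int)) :
    (PySem.List.sorted ys (fun x => x) false).Perm ys :=
  PySem.List.sorted_perm ys (fun x : List Int => x) false

-- ===== VERDICT (by name: the statement is the Claim_ definition above) =====
theorem countDistinctTriangles_spec : Claim_equal_countDistinctTriangles := by
  intro arr _
  unfold Spec_countDistinctTriangles
  set ys := arr.map (fun a => PySem.List.sorted a (fun x => x) false) with hys
  have hA : countDistinctTriangles arr = (ys.toFinset.card : Int) := by
    unfold countDistinctTriangles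
    have e : arr.foldl (fun (st : List (List Int) × Int) a =>
          let s := pvQuicksort (a.length + 1) a 0 (PySem.List.len a - 1)
          if s ∈ st.1 then st else (st.1 ++ [s], st.2 + 1)) ([], 0)
        = ys.foldl (fun (st : List (List Int) × Int) s =>
          if s ∈ st.1 then st else (st.1 ++ [s], st.2 + 1)) ([], 0) := by
      rw [hys, List.foldl_map]
      apply PySem.List.foldl_congr_mem
      intro st a _
      simp only [pvQuicksort_eq_sorted]
    rw [e, countA_go ys [] 0]
    simp
  have hB : countDistinctTriangles_alt arr
      = ((PySem.List.sorted ys (fun x => x) false).toFinset.card : Int) := by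
    unfold countDistinctTriangles_alt
    rw [← hys]
    cases hz : PySem.List.sorted ys (fun x => x) false with
    | nil => simp
    | cons y t =>
      have hpw : (y :: t).Pairwise (· ≤ ·) := by
        have h := pvSortedLL_pairwise ys
        rwa [hz] at h
      simp only [List.foldl_cons]
      have hinit : ((if (none : Option (List Int)) = some y then (0 : Int) else 0 + 1), some y)
          = ((1 : Int), some y) := by simp
      rw [hinit, countB_go t y 1 hpw]
      have e2 : t.toFinset \ {y} = t.toFinset.erase y := Finset.sdiff_singleton_eq_erase y _
      have e3 : (y :: t).toFinset = insert y (t.toFinset.erase y) := by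
        ext z
        simp only [List.toFinset_cons, Finset.mem_insert, Finset.mem_erase, List.mem_toFinset]
        by_cases hzy : z = y <;> simp [hzy]
      rw [e2, e3, Finset.card_insert_of_notMem (Finset.notMem_erase _ _)]
      push_cast
      ring
  rw [hA, hB, List.toFinset_eq_of_perm _ _ (pvSortedLL_perm ys)]
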